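-- pv_equiv track=rewrite | github.com/mahesha73/book-agentic-ai-edn-1 | Chapter_8/patient_diagnosis_ai/src/agents/patient_history_agent.py | _identify_data_sources
-- ===== SOURCE A (Python) =====
-- from typing import Dict, List, Any, Optional
--
-- def _identify_data_sources(intermediate_steps: List) -> List[str]:
--     """Identify data sources used during analysis."""
--     sources = set()
--     for step in intermediate_steps:
--         if len(step) >= 2:
--             observation = step[1]
--             if "database" in str(observation).lower():
--                 sources.add("internal_database")
--             if "fhir" in str(observation).lower():
--                 sources.add("fhir_server")
--
--     return list(sources)
-- ===== SOURCE B (Python) =====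
-- from typing import List
--
-- def _identify_data_sources(intermediate_steps: List) -> List[str]:
--     """Identify data sources used during analysis."""
--     has_db = any("database" in str(step[1]).lower()
--                  for step in intermediate_steps if len(step) >= 2)
--     has_fhir = any("fhir" in str(step[1]).lower()
--                    for step in intermediate_steps if len(step) >= 2)
--     out = []
--     if has_db:
--         out.append("internal_database")
--     if has_fhir:
--         out.append("fhir_server")
--     return out
-- ===== Notes on version B (the rewrite author's own statement) =====
-- stated objective: simpler
-- what changed: Replaces the per-step loop that accumulates tags into a set (returned in hash order) with two independent any()-scans, one per tag, and a direct deterministic list construction without any set.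
import Mathlib
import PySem

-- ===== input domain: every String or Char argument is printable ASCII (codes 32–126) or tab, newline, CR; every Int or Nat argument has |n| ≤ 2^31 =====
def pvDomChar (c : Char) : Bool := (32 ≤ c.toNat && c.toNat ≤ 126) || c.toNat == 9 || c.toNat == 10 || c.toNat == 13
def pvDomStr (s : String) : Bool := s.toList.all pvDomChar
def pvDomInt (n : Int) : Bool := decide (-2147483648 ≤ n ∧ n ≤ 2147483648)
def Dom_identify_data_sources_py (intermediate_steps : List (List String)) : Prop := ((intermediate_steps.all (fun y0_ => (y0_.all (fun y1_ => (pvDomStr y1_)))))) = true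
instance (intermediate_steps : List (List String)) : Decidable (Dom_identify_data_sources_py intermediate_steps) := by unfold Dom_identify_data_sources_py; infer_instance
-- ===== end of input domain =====

-- B replaces A's per-step loop accumulating a set (returned in hash order) with two
-- independent any()-scans, one per tag, building the result list directly (objective: simpler).


-- ===== PORT A =====
-- loop body of A: 'if len(step) >= 2: observation = step[1]; if "database" in str(observation).lower(): sources.add(...); if "fhir" in ...'
-- (observation is a str on our typed inputs, so str(observation) is observation itself;
--  step[1] is guarded by len(step) >= 2, so pyGetD's default is never used)
def pvStepA (s : PySem.Set String) (step : List String) : PySem.Set String :=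
  if 2 ≤ step.length then
    let observation := PySem.List.pyGetD step 1 ""
    let s := if PySem.Str.isIn "database" (PySem.Str.lower observation) then PySem.Set.add s "internal_database" else s
    if PySem.Str.isIn "fhir" (PySem.Str.lower observation) then PySem.Set.add s "fhir_server" else s
  else s

-- 'return list(sources)': the Set's element list. Python iterates the set in hash order, which
-- PySem does not model; under Pre_ below the set has at most one element, where this is exact.
def identify_data_sources_py (intermediate_steps : List (List String)) : List String :=
  intermediate_steps.foldl pvStepA PySem.Set.empty

-- ===== PORT B =====
-- 'any("<tag>" in str(step[1]).lower() for step in intermediate_steps if len(step) >= 2)'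
def pvHasTag (tag : String) (intermediate_steps : List (List String)) : Bool :=
  intermediate_steps.any (fun step =>
    2 ≤ step.length && PySem.Str.isIn tag (PySem.Str.lower (PySem.List.pyGetD step 1 "")))

def identify_data_sources_py_alt (intermediate_steps : List (List String)) : List String :=
  (if pvHasTag "database" intermediate_steps then ["internal_database"] else []) ++
  (if pvHasTag "fhir" intermediate_steps then ["fhir_server"] else [])

-- ===== PRECONDITION & SPEC =====
-- Pre_ excludes inputs on which BOTH tags occur: there A returns list of a two-element set,
-- whose order is Python's hash-iteration order — an accidental, run-dependent corner.
def Pre_identify_data_sources_py (intermediate_steps : List (List String)) : Prop :=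
  ¬ (pvHasTag "database" intermediate_steps = true ∧ pvHasTag "fhir" intermediate_steps = true)
instance (intermediate_steps : List (List String)) : Decidable (Pre_identify_data_sources_py intermediate_steps) := by unfold Pre_identify_data_sources_py; infer_instance

def pvWitness_identify_data_sources_py : List (List String) := [["act", "queried internal Database"]]

def Spec_identify_data_sources_py (intermediate_steps : List (List String)) (out : List String) : Prop := out = identify_data_sources_py_alt intermediate_steps
instance (intermediate_steps : List (List String)) (out : List String) : Decidable (Spec_identify_data_sources_py intermediate_steps out) := by unfold Spec_identify_data_sources_py; infer_instance

-- ===== CLAIM (what is proved, stated in full; the proofs are below) =====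
def Claim_equal_identify_data_sources_py : Prop := ∀ (intermediate_steps : List (List String)), Dom_identify_data_sources_py intermediate_steps → Pre_identify_data_sources_py intermediate_steps → Spec_identify_data_sources_py intermediate_steps (identify_data_sources_py intermediate_steps)

-- ===== LEMMAS AND PROOFS =====

-- if no step mentions "fhir", A's loop only ever adds "internal_database"
theorem pvFoldA_no_fhir (steps : List (List String)) (s : PySem.Set String)
    (h : pvHasTag "fhir" steps = false) :
    steps.foldl pvStepA s =
      if pvHasTag "database" steps then PySem.Set.add s "internal_database" else s := by
  induction steps generalizing s with
  | nil => simp [pvHasTag]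
  | cons step rest ih =>
    simp only [pvHasTag, List.any_cons, Bool.or_eq_false_iff, Bool.and_eq_false_iff] at h
    obtain ⟨h1, h2⟩ := h
    simp only [List.foldl_cons, pvHasTag, List.any_cons]
    by_cases hl : 2 ≤ step.length
    · have hf : PySem.Str.isIn "fhir" (PySem.Str.lower (PySem.List.pyGetD step 1 "")) = false := by
        rcases h1 with h1 | h1
        · simp [hl] at h1
        · exact h1
      by_cases hd : PySem.Str.isIn "database" (PySem.Str.lower (PySem.List.pyGetD step 1 "")) = true
      · simp only [pvStepA, if_pos hl, hf, hd, if_true, if_false, Bool.false_eq_true]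
        rw [ih _ h2]
        simp [pvHasTag, hl]
      · simp only [Bool.not_eq_true] at hd
        simp only [pvStepA, if_pos hl, hf, hd, if_false, Bool.false_eq_true]
        rw [ih _ h2]
        simp [pvHasTag, hl]
    · simp only [pvStepA, if_neg hl]
      rw [ih _ h2]
      simp [pvHasTag, hl]

-- symmetric: if no step mentions "database", A's loop only ever adds "fhir_server"
theorem pvFoldA_no_db (steps : List (List String)) (s : PySem.Set String)
    (h : pvHasTag "database" steps = false) :
    steps.foldl pvStepA s =
      if pvHasTag "fhir" steps then PySem.Set.add s "fhir_server" else s := by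
  induction steps generalizing s with
  | nil => simp [pvHasTag]
  | cons step rest ih =>
    simp only [pvHasTag, List.any_cons, Bool.or_eq_false_iff, Bool.and_eq_false_iff] at h
    obtain ⟨h1, h2⟩ := h
    simp only [List.foldl_cons, pvHasTag, List.any_cons]
    by_cases hl : 2 ≤ step.length
    · have hd : PySem.Str.isIn "database" (PySem.Str.lower (PySem.List.pyGetD step 1 "")) = false := by
        rcases h1 with h1 | h1
        · simp [hl] at h1
        · exact h1
      by_cases hf : PySem.Str.isIn "fhir" (PySem.Str.lower (PySem.List.pyGetD step 1 "")) = true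
      · simp only [pvStepA, if_pos hl, hf, hd, if_true, if_false, Bool.false_eq_true]
        rw [ih _ h2]
        simp [pvHasTag, hl]
      · simp only [Bool.not_eq_true] at hf
        simp only [pvStepA, if_pos hl, hf, hd, if_false, Bool.false_eq_true]
        rw [ih _ h2]
        simp [pvHasTag, hl]
    · simp only [pvStepA, if_neg hl]
      rw [ih _ h2]
      simp [pvHasTag, hl]

-- ===== VERDICT (by name: the statement is the Claim_ definition above) =====
theorem identify_data_sources_py_spec : Claim_equal_identify_data_sources_py := by
  intro steps _ hpre
  unfold Spec_identify_data_sources_py identify_data_sources_py identify_data_sources_py_alt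
  by_cases hf : pvHasTag "fhir" steps = true
  · have hd : pvHasTag "database" steps = false := by
      by_contra h
      exact hpre ⟨by simpa using h, hf⟩
    rw [pvFoldA_no_db steps PySem.Set.empty hd]
    simp [hd, hf, PySem.Set.add, PySem.Set.empty, PySem.Set.contains]
  · have hf' : pvHasTag "fhir" steps = false := by simpa using hf
    rw [pvFoldA_no_fhir steps PySem.Set.empty hf']
    by_cases hd : pvHasTag "database" steps = true <;>
      simp [hd, hf', PySem.Set.add, PySem.Set.empty, PySem.Set.contains]
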